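-- pv_equiv track=rewrite | github.com/super30admin/Binary-Search-2 | first_and_last_position.py | startBinary
-- ===== SOURCE A (Python) =====
-- def startBinary(nums,target):
--     left = 0
--     right = len(nums)-1
--     while left <= right:
--         mid = (left + right) // 2
--         if nums[mid] == target:
--             if mid == 0 or nums[mid-1] != target:
--                 return mid
--             else:
--                 right = mid - 1
--         elif nums[mid] < target:
--             left = mid + 1
--         else:
--             right = mid - 1
--     return -1
-- ===== SOURCE B (Python) =====
-- def startBinary(nums, target):
--     # Recursive divide-and-conquer on slices: the segment carries no indices; the
--     # value just left of the segment is threaded as `prev`, and the index is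
--     # recombined from relative positions on the way back up.
--     def go(seg, prev):
--         if not seg:
--             return -1
--         m = (len(seg) - 1) // 2
--         v = seg[m]
--         left_neighbor = seg[m - 1] if m else prev
--         if v == target and left_neighbor != target:
--             return m
--         if v < target:
--             r = go(seg[m + 1:], v)
--             return -1 if r == -1 else m + 1 + r
--         return go(seg[:m], prev)
--     return go(nums, None)
-- ===== Notes on version B (the rewrite author's own statement) =====
-- stated objective: alternative
-- what changed: Rewrites the iterative index-based binary search as a recursive divide-and-conquer over list slices: the recursion carries no indices, threads the value just left of the segment as a parameter for the first-occurrence check, and recombines relative indices on the way back up; the probe sequence (and hence the result) is identical on every input, so equivalence is total.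
import Mathlib
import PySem

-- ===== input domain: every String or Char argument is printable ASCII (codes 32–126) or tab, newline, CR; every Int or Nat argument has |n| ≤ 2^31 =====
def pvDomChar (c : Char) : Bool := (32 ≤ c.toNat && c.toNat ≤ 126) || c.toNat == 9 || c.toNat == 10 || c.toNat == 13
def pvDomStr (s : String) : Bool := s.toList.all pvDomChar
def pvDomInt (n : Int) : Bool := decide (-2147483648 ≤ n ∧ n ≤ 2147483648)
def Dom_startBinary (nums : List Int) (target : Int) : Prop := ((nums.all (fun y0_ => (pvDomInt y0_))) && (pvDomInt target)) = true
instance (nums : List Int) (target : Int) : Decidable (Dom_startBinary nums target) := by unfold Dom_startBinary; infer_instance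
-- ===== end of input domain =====

-- B recasts the iterative index-based binary search as a recursive divide-and-conquer over
-- list slices (prev-value threading, relative-index recombination); same probe sequence,
-- so A = B on every input (alternative decomposition, no speed claim).


-- ===== PORT A =====
-- A's while loop as recursion on (left, right); `mid` is inlined ((left+right)//2).
def startBinaryLoop (nums : List Int) (target left right : Int) : Int :=
  if _h : left ≤ right then
    if PySem.List.pyGetD nums (PySem.Int.floordiv (left + right) 2) 0 = target then
      if PySem.Int.floordiv (left + right) 2 = 0 ∨
          PySem.List.pyGetD nums (PySem.Int.floordiv (left + right) 2 - 1) 0 ≠ target then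
        PySem.Int.floordiv (left + right) 2
      else startBinaryLoop nums target left (PySem.Int.floordiv (left + right) 2 - 1)
    else if PySem.List.pyGetD nums (PySem.Int.floordiv (left + right) 2) 0 < target then
      startBinaryLoop nums target (PySem.Int.floordiv (left + right) 2 + 1) right
    else
      startBinaryLoop nums target left (PySem.Int.floordiv (left + right) 2 - 1)
  else -1
termination_by (right - left + 1).toNat
decreasing_by
  all_goals
    have hb := PySem.Int.floordiv_two_mid_bounds _h
    omega

def startBinary (nums : List Int) (target : Int) : Int :=
  startBinaryLoop nums target 0 ((nums.length : Int) - 1)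

-- ===== PORT B =====
-- Source B's inner `go`: recursion on the slice `seg`; `prev` is the value just left of the
-- segment (none at the list's start; Python's None ≠ int comparison is the Option mismatch).
def startBinaryGo (target : Int) (seg : List Int) (prev : Option Int) : Int :=
  if _h : seg.isEmpty then -1
  else
    let m : Int := PySem.Int.floordiv ((seg.length : Int) - 1) 2
    let v : Int := PySem.List.pyGetD seg m 0
    let ln : Option Int := if m = 0 then prev else some (PySem.List.pyGetD seg (m - 1) 0)
    if v = target ∧ ln ≠ some target then m
    else if v < target then
      let r := startBinaryGo target (PySem.List.slice seg (some (m + 1)) none) (some v)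
      if r = -1 then -1 else m + 1 + r
    else startBinaryGo target (PySem.List.slice seg none (some m)) prev
termination_by seg.length
decreasing_by
  · rw [PySem.List.slice_from _ (by
      have := PySem.Int.floordiv_eq_ediv_of_pos (a := (seg.length : Int) - 1) (b := 2) (by omega)
      have hne : seg ≠ [] := by simpa using _h
      have : 0 < seg.length := List.length_pos_iff.mpr hne
      omega)]
    have := PySem.Int.floordiv_eq_ediv_of_pos (a := (seg.length : Int) - 1) (b := 2) (by omega)
    have hne : seg ≠ [] := by simpa using _h
    have hpos : 0 < seg.length := List.length_pos_iff.mpr hne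
    simp only [List.length_drop]
    omega
  · rw [PySem.List.slice_to _ (by
      have := PySem.Int.floordiv_eq_ediv_of_pos (a := (seg.length : Int) - 1) (b := 2) (by omega)
      have hne : seg ≠ [] := by simpa using _h
      have : 0 < seg.length := List.length_pos_iff.mpr hne
      omega)]
    have := PySem.Int.floordiv_eq_ediv_of_pos (a := (seg.length : Int) - 1) (b := 2) (by omega)
    have hne : seg ≠ [] := by simpa using _h
    have hpos : 0 < seg.length := List.length_pos_iff.mpr hne
    simp only [List.length_take]
    omega

def startBinary_alt (nums : List Int) (target : Int) : Int :=
  startBinaryGo target nums none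

-- ===== PRECONDITION & SPEC =====
-- No Pre_: both programs are total and agree on every input.
def Spec_startBinary (nums : List Int) (target : Int) (out : Int) : Prop := out = startBinary_alt nums target
instance (nums : List Int) (target : Int) (out : Int) : Decidable (Spec_startBinary nums target out) := by unfold Spec_startBinary; infer_instance

-- ===== CLAIM (what is proved, stated in full; the proofs are below) =====
def Claim_equal_startBinary : Prop := ∀ (nums : List Int) (target : Int), Dom_startBinary nums target → Spec_startBinary nums target (startBinary nums target)

-- ===== LEMMAS AND PROOFS =====

/-- The loop never returns an index below its current left bound. -/
theorem startBinaryLoop_lb (nums : List Int) (target : Int) :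
    ∀ (n : Nat) (left right : Int), (right - left + 1).toNat ≤ n →
    startBinaryLoop nums target left right = -1 ∨
      left ≤ startBinaryLoop nums target left right := by
  intro n
  induction n with
  | zero =>
    intro left right hn
    rw [startBinaryLoop, dif_neg (by omega)]
    exact Or.inl rfl
  | succ n ih =>
    intro left right hn
    by_cases hlr : left ≤ right
    · rw [startBinaryLoop, dif_pos hlr]
      have hb := PySem.Int.floordiv_two_mid_bounds hlr
      split_ifs with h1 h2 h3
      · exact Or.inr hb.1
      · rcases ih left (PySem.Int.floordiv (left + right) 2 - 1) (by omega) with h | h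
        · exact Or.inl h
        · exact Or.inr h
      · rcases ih (PySem.Int.floordiv (left + right) 2 + 1) right (by omega) with h | h
        · exact Or.inl h
        · exact Or.inr (by omega)
      · rcases ih left (PySem.Int.floordiv (left + right) 2 - 1) (by omega) with h | h
        · exact Or.inl h
        · exact Or.inr h
    · rw [startBinaryLoop, dif_neg hlr]
      exact Or.inl rfl

/-- B's recursion on the slice `nums[left : right+1]` with the matching `prev`
computes the loop's result shifted by `left` (with -1 passed through). -/
theorem startBinaryGo_eq (nums : List Int) (target : Int) :
    ∀ (n : Nat) (left right : Int), (right - left + 1).toNat ≤ n → 0 ≤ left →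
    right < (nums.length : Int) →
    startBinaryGo target ((nums.drop left.toNat).take (right - left + 1).toNat)
        (if left = 0 then none else some (PySem.List.pyGetD nums (left - 1) 0)) =
      (if startBinaryLoop nums target left right = -1 then -1
       else startBinaryLoop nums target left right - left) := by
  intro n
  induction n with
  | zero =>
    intro left right hn h0 hr
    have hseg : (right - left + 1).toNat = 0 := by omega
    rw [hseg]
    rw [startBinaryGo, dif_pos (by simp)]
    rw [startBinaryLoop, dif_neg (by omega)]
    simp
  | succ n ih =>
    intro left right hn h0 hr
    by_cases hlr : left ≤ right
    · -- segment and its length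
      set seg := (nums.drop left.toNat).take (right - left + 1).toNat with hsegdef
      have hlen : seg.length = (right - left + 1).toNat := by
        simp only [hsegdef, List.length_take, List.length_drop]
        omega
      have hpos : 0 < seg.length := by omega
      rw [startBinaryGo, dif_neg (by simp [List.isEmpty_iff]; intro hnil; rw [hnil] at hlen; simp at hlen; omega)]
      -- midpoints
      set midA := PySem.Int.floordiv (left + right) 2 with hmidAdef
      have hbA := PySem.Int.floordiv_two_mid_bounds hlr
      rw [← hmidAdef] at hbA
      set m := PySem.Int.floordiv ((seg.length : Int) - 1) 2 with hmdef
      have hmeq : m = midA - left := by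
        rw [hmdef, hmidAdef, hlen,
          PySem.Int.floordiv_eq_ediv_of_pos (by omega),
          PySem.Int.floordiv_eq_ediv_of_pos (by omega)]
        omega
      have hm0 : 0 ≤ m := by omega
      have hmlt : m < (seg.length : Int) := by omega
      -- seg[m] = nums[midA]
      have hgetseg : ∀ (k : Int), 0 ≤ k → k < (seg.length : Int) →
          PySem.List.pyGetD seg k 0 = PySem.List.pyGetD nums (left + k) 0 := by
        intro k hk0 hklt
        have hkN : k.toNat < seg.length := by omega
        have hlkN : (left + k).toNat < nums.length := by omega
        rw [PySem.List.pyGetD_eq_getElem seg 0 hk0 hklt,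
          PySem.List.pyGetD_eq_getElem nums 0 (by omega) (by omega)]
        simp only [hsegdef, List.getElem_take, List.getElem_drop]
        congr 1
        omega
      have hv : PySem.List.pyGetD seg m 0 = PySem.List.pyGetD nums midA 0 := by
        rw [hgetseg m hm0 hmlt]
        congr 1
        omega
      -- A-side step
      rw [startBinaryLoop, dif_pos hlr, ← hmidAdef]
      -- first-occurrence conditions coincide
      have hlncond :
          ((if m = 0 then (if left = 0 then (none : Option Int)
              else some (PySem.List.pyGetD nums (left - 1) 0))
            else some (PySem.List.pyGetD seg (m - 1) 0)) ≠ some target) ↔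
          (midA = 0 ∨ PySem.List.pyGetD nums (midA - 1) 0 ≠ target) := by
        by_cases hm : m = 0
        · rw [if_pos hm]
          by_cases hl : left = 0
          · rw [if_pos hl]
            constructor
            · intro _; left; omega
            · intro _; simp
          · rw [if_neg hl]
            have : left - 1 = midA - 1 := by omega
            rw [this]
            constructor
            · intro h; right; simpa using h
            · intro h; rcases h with h | h
              · omega
              · simpa using h
        · rw [if_neg hm]
          rw [hgetseg (m - 1) (by omega) (by omega)]
          have : left + (m - 1) = midA - 1 := by omega
          rw [this]
          constructor
          · intro h; right; simpa using h
          · intro h; rcases h with h | h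
            · omega
            · simpa using h
      by_cases hveq : PySem.List.pyGetD nums midA 0 = target
      · rw [if_pos hveq]
        by_cases hfirst : midA = 0 ∨ PySem.List.pyGetD nums (midA - 1) 0 ≠ target
        · -- both return the index
          rw [if_pos hfirst, if_pos ⟨by rw [hv]; exact hveq, hlncond.mpr hfirst⟩]
          rw [if_neg (by omega)]
          omega
        · -- equal but not first: both recurse on the left part
          rw [if_neg hfirst,
            if_neg (fun hc => hfirst (hlncond.mp hc.2)),
            if_neg (by rw [hv, hveq]; simp)]
          rw [PySem.List.slice_to _ hm0]
          have hseg' : seg.take m.toNat =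
              (nums.drop left.toNat).take ((midA - 1) - left + 1).toNat := by
            rw [hsegdef, List.take_take]
            congr 1
            omega
          rw [hseg', ih left (midA - 1) (by omega) h0 (by omega)]
      · rw [if_neg hveq]
        by_cases hvlt : PySem.List.pyGetD nums midA 0 < target
        · -- strictly smaller: recurse on the right part
          rw [if_pos hvlt,
            if_neg (fun hc => hveq (by rw [← hv]; exact hc.1)),
            if_pos (by rw [hv]; exact hvlt)]
          rw [PySem.List.slice_from _ (by omega)]
          have hseg' : seg.drop (m + 1).toNat =
              (nums.drop (midA + 1).toNat).take (right - (midA + 1) + 1).toNat := by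
            rw [hsegdef, List.drop_take, List.drop_drop]
            congr 1
            · omega
            · congr 1
              omega
          have hprev' : some (PySem.List.pyGetD seg m 0) =
              (if midA + 1 = 0 then none
               else some (PySem.List.pyGetD nums (midA + 1 - 1) 0)) := by
            rw [if_neg (by omega), hv]
            congr 2
            omega
          rw [hseg', hprev', ih (midA + 1) right (by omega) (by omega) hr]
          rcases startBinaryLoop_lb nums target ((right - (midA + 1) + 1).toNat)
              (midA + 1) right (le_refl _) with hres | hres
          · rw [hres]; simp
          · rw [if_neg (by omega), if_neg (by omega), if_neg (by omega)]
            omega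
        · -- strictly larger: recurse on the left part
          rw [if_neg hvlt,
            if_neg (fun hc => hveq (by rw [← hv]; exact hc.1)),
            if_neg (by rw [hv]; exact hvlt)]
          rw [PySem.List.slice_to _ hm0]
          have hseg' : seg.take m.toNat =
              (nums.drop left.toNat).take ((midA - 1) - left + 1).toNat := by
            rw [hsegdef, List.take_take]
            congr 1
            omega
          rw [hseg', ih left (midA - 1) (by omega) h0 (by omega)]
    · have hseg : (right - left + 1).toNat = 0 := by omega
      rw [hseg]
      rw [startBinaryGo, dif_pos (by simp)]
      rw [startBinaryLoop, dif_neg (by omega)]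
      simp

-- ===== VERDICT (by name: the statement is the Claim_ definition above) =====
theorem startBinary_spec : Claim_equal_startBinary := by
  intro nums target _hdom
  unfold Spec_startBinary startBinary startBinary_alt
  have h := startBinaryGo_eq nums target nums.length 0 ((nums.length : Int) - 1)
    (by omega) (by omega) (by omega)
  simp only [Int.toNat_zero, List.drop_zero, sub_zero, if_true] at h
  have htake : nums.take ((nums.length : Int) - 1 + 1).toNat = nums := by
    apply List.take_of_length_le
    omega
  rw [htake] at h
  rw [h]
  split_ifs with hres
  · omega
  · rfl
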